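-- pv_equiv track=rewrite | github.com/ElhassanSoussi/Security-Officer | backend/app/core/assistant_kb.py | pick_kb_topics
-- ===== SOURCE A (Python) =====
-- def pick_kb_topics(intent: str, message: str) -> list[str]:
--     """
--     Return the ordered list of KB topic keys most relevant for the intent + message.
--     Used to assemble context for the response builder.
--     """
--     t = message.lower()
--
--     base: list[str] = []
--
--     if intent == "plan_limits":
--         base = ["plans_billing"]
--     elif intent == "status":
--         base = ["plans_billing"]
--     elif intent == "troubleshooting":
--         base = ["troubleshooting"]
--     elif intent in ("how_to", "navigation", "unknown"):
--         # Pick by keyword match in message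
--         if any(w in t for w in ("document", "upload", "file", "pdf", "docx")):
--             base.append("documents")
--         if any(w in t for w in ("project", "workspace")):
--             base.append("projects")
--         if any(w in t for w in ("run", "questionnaire", "question", "answer")):
--             base.append("runs")
--         if any(w in t for w in ("export", "download", "excel", "report")):
--             base.append("exports")
--         if any(w in t for w in ("audit", "log", "history", "track")):
--             base.append("audit_review")
--         if any(w in t for w in ("plan", "billing", "payment", "invoice", "subscription")):
--             base.append("plans_billing")
--         if any(w in t for w in ("start", "begin", "first", "setup", "onboard", "invite", "team")):
--             base.append("getting_started")
--         if not base: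
--             base = ["getting_started"]
--
--     return base
-- ===== SOURCE B (Python) =====
-- # B: inverted index keyword->topic; collect the set of hit topics in one pass over
-- # the keywords, then emit them in canonical topic order (simpler/idiomatic lookup).
-- _KEYWORD_TOPIC = {
--     "document": "documents", "upload": "documents", "file": "documents",
--     "pdf": "documents", "docx": "documents",
--     "project": "projects", "workspace": "projects",
--     "run": "runs", "questionnaire": "runs", "question": "runs", "answer": "runs",
--     "export": "exports", "download": "exports", "excel": "exports", "report": "exports",
--     "audit": "audit_review", "log": "audit_review", "history": "audit_review", "track": "audit_review",
--     "plan": "plans_billing", "billing": "plans_billing", "payment": "plans_billing",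
--     "invoice": "plans_billing", "subscription": "plans_billing",
--     "start": "getting_started", "begin": "getting_started", "first": "getting_started",
--     "setup": "getting_started", "onboard": "getting_started", "invite": "getting_started",
--     "team": "getting_started",
-- }
-- _TOPIC_ORDER = ["documents", "projects", "runs", "exports", "audit_review",
--                 "plans_billing", "getting_started"]
--
-- def pick_kb_topics(intent: str, message: str) -> list[str]:
--     if intent in ("plan_limits", "status"):
--         return ["plans_billing"]
--     if intent == "troubleshooting":
--         return ["troubleshooting"]
--     if intent not in ("how_to", "navigation", "unknown"):
--         return []
--     t = message.lower()
--     hits = {topic for kw, topic in _KEYWORD_TOPIC.items() if kw in t}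
--     return [topic for topic in _TOPIC_ORDER if topic in hits] or ["getting_started"]
-- ===== Notes on version B (the rewrite author's own statement) =====
-- stated objective: alternative
-- what changed: Instead of seven per-topic keyword ifs, B builds an inverted keyword-to-topic index, collects the set of hit topics in one pass over the keywords, and emits them by filtering a canonical topic-order list on set membership.
import Mathlib
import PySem

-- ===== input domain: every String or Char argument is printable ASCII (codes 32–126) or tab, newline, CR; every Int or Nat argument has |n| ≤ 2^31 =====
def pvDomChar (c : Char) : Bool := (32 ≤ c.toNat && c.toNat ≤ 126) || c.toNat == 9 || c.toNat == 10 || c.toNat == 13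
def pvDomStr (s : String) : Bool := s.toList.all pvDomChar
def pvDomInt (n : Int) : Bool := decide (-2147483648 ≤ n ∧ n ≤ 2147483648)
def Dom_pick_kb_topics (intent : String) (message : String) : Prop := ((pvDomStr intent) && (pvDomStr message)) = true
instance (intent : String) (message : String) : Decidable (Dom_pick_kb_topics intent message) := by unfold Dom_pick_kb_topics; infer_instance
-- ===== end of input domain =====

-- B replaces the per-topic keyword ifs by an inverted keyword->topic index: one pass
-- over the keywords collects the set of hit topics, which is then emitted in canonical
-- topic order (objective: alternative; same cost).

-- ===== PORT A =====
def pick_kb_topics (intent : String) (message : String) : List String :=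
  let t := PySem.Str.lower message
  let base : List String := []
  if intent == "plan_limits" then ["plans_billing"]
  else if intent == "status" then ["plans_billing"]
  else if intent == "troubleshooting" then ["troubleshooting"]
  else if intent == "how_to" || intent == "navigation" || intent == "unknown" then
    let base := if ["document", "upload", "file", "pdf", "docx"].any (fun w => PySem.Str.isIn w t) then base ++ ["documents"] else base
    let base := if ["project", "workspace"].any (fun w => PySem.Str.isIn w t) then base ++ ["projects"] else base
    let base := if ["run", "questionnaire", "question", "answer"].any (fun w => PySem.Str.isIn w t) then base ++ ["runs"] else base
    let base := if ["export", "download", "excel", "report"].any (fun w => PySem.Str.isIn w t) then base ++ ["exports"] else base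
    let base := if ["audit", "log", "history", "track"].any (fun w => PySem.Str.isIn w t) then base ++ ["audit_review"] else base
    let base := if ["plan", "billing", "payment", "invoice", "subscription"].any (fun w => PySem.Str.isIn w t) then base ++ ["plans_billing"] else base
    let base := if ["start", "begin", "first", "setup", "onboard", "invite", "team"].any (fun w => PySem.Str.isIn w t) then base ++ ["getting_started"] else base
    if base == [] then ["getting_started"] else base
  else base

-- ===== PORT B =====
-- inverted index keyword -> topic (a Python dict; its items in insertion order)
def kwTopic : List (String × String) :=
  [("document", "documents"), ("upload", "documents"), ("file", "documents"),
   ("pdf", "documents"), ("docx", "documents"),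
   ("project", "projects"), ("workspace", "projects"),
   ("run", "runs"), ("questionnaire", "runs"), ("question", "runs"), ("answer", "runs"),
   ("export", "exports"), ("download", "exports"), ("excel", "exports"), ("report", "exports"),
   ("audit", "audit_review"), ("log", "audit_review"), ("history", "audit_review"), ("track", "audit_review"),
   ("plan", "plans_billing"), ("billing", "plans_billing"), ("payment", "plans_billing"),
   ("invoice", "plans_billing"), ("subscription", "plans_billing"),
   ("start", "getting_started"), ("begin", "getting_started"), ("first", "getting_started"),
   ("setup", "getting_started"), ("onboard", "getting_started"), ("invite", "getting_started"),
   ("team", "getting_started")]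

def topicOrder : List String :=
  ["documents", "projects", "runs", "exports", "audit_review", "plans_billing", "getting_started"]

def pick_kb_topics_alt (intent : String) (message : String) : List String :=
  if intent == "plan_limits" || intent == "status" then ["plans_billing"]
  else if intent == "troubleshooting" then ["troubleshooting"]
  else if !(intent == "how_to" || intent == "navigation" || intent == "unknown") then []
  else
    let t := PySem.Str.lower message
    let hits : PySem.Set String :=
      PySem.Set.ofList ((kwTopic.filter (fun p => PySem.Str.isIn p.1 t)).map (fun p => p.2))
    let res := topicOrder.filter (fun top => PySem.Set.contains hits top)
    if res.isEmpty then ["getting_started"] else res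

-- ===== PRECONDITION & SPEC =====
def Spec_pick_kb_topics (intent : String) (message : String) (out : List String) : Prop := out = pick_kb_topics_alt intent message
instance (intent : String) (message : String) (out : List String) : Decidable (Spec_pick_kb_topics intent message out) := by unfold Spec_pick_kb_topics; infer_instance

-- ===== CLAIM (what is proved, stated in full; the proofs are below) =====
def Claim_equal_pick_kb_topics : Prop := ∀ (intent : String) (message : String), Dom_pick_kb_topics intent message → Spec_pick_kb_topics intent message (pick_kb_topics intent message)

-- ===== LEMMAS AND PROOFS =====

-- membership in B's hit set: a topic is hit iff some keyword indexed to it occurs in t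
theorem contains_hits (t : String) (x : String) :
    PySem.Set.contains
      (PySem.Set.ofList ((kwTopic.filter (fun p => PySem.Str.isIn p.1 t)).map (fun p => p.2))) x
      = kwTopic.any (fun p => PySem.Str.isIn p.1 t && p.2 == x) := by
  rw [Bool.eq_iff_iff]
  simp only [PySem.Set.contains_iff, PySem.Set.mem_ofList, List.mem_map, List.mem_filter,
    List.any_eq_true, Bool.and_eq_true, beq_iff_eq]
  constructor
  · rintro ⟨p, ⟨hp, hc⟩, hx⟩; exact ⟨p, hp, hc, hx⟩
  · rintro ⟨p, hp, hc, hx⟩; exact ⟨p, ⟨hp, hc⟩, hx⟩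

-- the hit test for each concrete topic is that topic's keyword test
theorem cd1 (t : String) : kwTopic.any (fun p => PySem.Str.isIn p.1 t && p.2 == "documents") = ["document","upload","file","pdf","docx"].any (fun w => PySem.Str.isIn w t) := by
  simp [kwTopic, List.any_cons, List.any_nil]
theorem cd2 (t : String) : kwTopic.any (fun p => PySem.Str.isIn p.1 t && p.2 == "projects") = ["project","workspace"].any (fun w => PySem.Str.isIn w t) := by
  simp [kwTopic, List.any_cons, List.any_nil]
theorem cd3 (t : String) : kwTopic.any (fun p => PySem.Str.isIn p.1 t && p.2 == "runs") = ["run","questionnaire","question","answer"].any (fun w => PySem.Str.isIn w t) := by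
  simp [kwTopic, List.any_cons, List.any_nil]
theorem cd4 (t : String) : kwTopic.any (fun p => PySem.Str.isIn p.1 t && p.2 == "exports") = ["export","download","excel","report"].any (fun w => PySem.Str.isIn w t) := by
  simp [kwTopic, List.any_cons, List.any_nil]
theorem cd5 (t : String) : kwTopic.any (fun p => PySem.Str.isIn p.1 t && p.2 == "audit_review") = ["audit","log","history","track"].any (fun w => PySem.Str.isIn w t) := by
  simp [kwTopic, List.any_cons, List.any_nil]
theorem cd6 (t : String) : kwTopic.any (fun p => PySem.Str.isIn p.1 t && p.2 == "plans_billing") = ["plan","billing","payment","invoice","subscription"].any (fun w => PySem.Str.isIn w t) := by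
  simp [kwTopic, List.any_cons, List.any_nil]
theorem cd7 (t : String) : kwTopic.any (fun p => PySem.Str.isIn p.1 t && p.2 == "getting_started") = ["start","begin","first","setup","onboard","invite","team"].any (fun w => PySem.Str.isIn w t) := by
  simp [kwTopic, List.any_cons, List.any_nil]

-- The keyword branch: A's chain of seven conditional appends equals B's
-- canonical-order emission of the keyword-index hit set.
theorem kw_branch (t : String) :
    (let base : List String := []
     let base := if ["document", "upload", "file", "pdf", "docx"].any (fun w => PySem.Str.isIn w t) then base ++ ["documents"] else base
     let base := if ["project", "workspace"].any (fun w => PySem.Str.isIn w t) then base ++ ["projects"] else base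
     let base := if ["run", "questionnaire", "question", "answer"].any (fun w => PySem.Str.isIn w t) then base ++ ["runs"] else base
     let base := if ["export", "download", "excel", "report"].any (fun w => PySem.Str.isIn w t) then base ++ ["exports"] else base
     let base := if ["audit", "log", "history", "track"].any (fun w => PySem.Str.isIn w t) then base ++ ["audit_review"] else base
     let base := if ["plan", "billing", "payment", "invoice", "subscription"].any (fun w => PySem.Str.isIn w t) then base ++ ["plans_billing"] else base
     let base := if ["start", "begin", "first", "setup", "onboard", "invite", "team"].any (fun w => PySem.Str.isIn w t) then base ++ ["getting_started"] else base
     if base == [] then ["getting_started"] else base) =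
    (let hits : PySem.Set String :=
       PySem.Set.ofList ((kwTopic.filter (fun p => PySem.Str.isIn p.1 t)).map (fun p => p.2))
     let res := topicOrder.filter (fun top => PySem.Set.contains hits top)
     if res.isEmpty then ["getting_started"] else res) := by
  simp only [topicOrder, List.filter_cons, List.filter_nil, contains_hits,
    cd1, cd2, cd3, cd4, cd5, cd6, cd7]
  generalize ["document","upload","file","pdf","docx"].any (fun w => PySem.Str.isIn w t) = c1
  generalize ["project","workspace"].any (fun w => PySem.Str.isIn w t) = c2
  generalize ["run","questionnaire","question","answer"].any (fun w => PySem.Str.isIn w t) = c3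
  generalize ["export","download","excel","report"].any (fun w => PySem.Str.isIn w t) = c4
  generalize ["audit","log","history","track"].any (fun w => PySem.Str.isIn w t) = c5
  generalize ["plan","billing","payment","invoice","subscription"].any (fun w => PySem.Str.isIn w t) = c6
  generalize ["start","begin","first","setup","onboard","invite","team"].any (fun w => PySem.Str.isIn w t) = c7
  revert c1 c2 c3 c4 c5 c6 c7
  decide

-- ===== VERDICT (by name: the statement is the Claim_ definition above) =====
set_option maxHeartbeats 1000000 in
theorem pick_kb_topics_spec : Claim_equal_pick_kb_topics := by
  intro intent message _
  unfold Spec_pick_kb_topics pick_kb_topics pick_kb_topics_alt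
  by_cases h1 : intent = "plan_limits"
  · subst h1; simp only [String.reduceBEq, Bool.true_or, if_true]
  by_cases h2 : intent = "status"
  · subst h2; simp only [String.reduceBEq, Bool.or_true, Bool.false_eq_true, reduceIte, if_true, if_false]
  by_cases h3 : intent = "troubleshooting"
  · subst h3; simp only [String.reduceBEq, Bool.or_self, Bool.false_eq_true, reduceIte, if_true, if_false]
  by_cases h4 : intent = "how_to"
  · subst h4; simp only [String.reduceBEq, Bool.true_or, Bool.false_or, Bool.or_true, Bool.or_self, Bool.not_true, Bool.false_eq_true, if_true, if_false]
    exact kw_branch (PySem.Str.lower message)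
  by_cases h5 : intent = "navigation"
  · subst h5; simp only [String.reduceBEq, Bool.true_or, Bool.false_or, Bool.or_true, Bool.or_self, Bool.not_true, Bool.false_eq_true, if_true, if_false]
    exact kw_branch (PySem.Str.lower message)
  by_cases h6 : intent = "unknown"
  · subst h6; simp only [String.reduceBEq, Bool.true_or, Bool.false_or, Bool.or_true, Bool.or_self, Bool.not_true, Bool.false_eq_true, if_true, if_false]
    exact kw_branch (PySem.Str.lower message)
  · have e1 : (intent == "plan_limits") = false := by simp [h1]
    have e2 : (intent == "status") = false := by simp [h2]
    have e3 : (intent == "troubleshooting") = false := by simp [h3]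
    have e4 : (intent == "how_to") = false := by simp [h4]
    have e5 : (intent == "navigation") = false := by simp [h5]
    have e6 : (intent == "unknown") = false := by simp [h6]
    simp only [e1, e2, e3, e4, e5, e6, Bool.or_self, Bool.not_false, Bool.false_eq_true,
      if_true, if_false]
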